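-- pv_equiv track=rewrite | github.com/mehuljain133/Discrete-Structures-UG-Projects | Introduction.py | generalized_inclusion_exclusion
-- ===== SOURCE A (Python) =====
-- import itertools
--
-- def generalized_inclusion_exclusion(sets):
--     n = len(sets)
--     total = 0
--
--     # Iterate over all subsets of the sets
--     for r in range(1, n+1):
--         for subset in itertools.combinations(sets, r):
--             intersection = set.intersection(*subset)
--             total += (-1)**(r+1) * len(intersection)
--
--     return total
-- ===== SOURCE B (Python) =====
-- def generalized_inclusion_exclusion(sets):
--     # Accumulate the union of all sets in one linear pass; its size equals
--     # the inclusion-exclusion alternating sum A computes over all 2^n subsets.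
--     result = set()
--     for s in sets:
--         result |= s
--     return len(result)
-- ===== Notes on version B (the rewrite author's own statement) =====
-- stated objective: faster
-- what changed: Replaces the enumeration of all 2^n-1 nonempty subsets with their alternating intersection-size sum by a single linear accumulation of the running union, returning its size.
import Mathlib
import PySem

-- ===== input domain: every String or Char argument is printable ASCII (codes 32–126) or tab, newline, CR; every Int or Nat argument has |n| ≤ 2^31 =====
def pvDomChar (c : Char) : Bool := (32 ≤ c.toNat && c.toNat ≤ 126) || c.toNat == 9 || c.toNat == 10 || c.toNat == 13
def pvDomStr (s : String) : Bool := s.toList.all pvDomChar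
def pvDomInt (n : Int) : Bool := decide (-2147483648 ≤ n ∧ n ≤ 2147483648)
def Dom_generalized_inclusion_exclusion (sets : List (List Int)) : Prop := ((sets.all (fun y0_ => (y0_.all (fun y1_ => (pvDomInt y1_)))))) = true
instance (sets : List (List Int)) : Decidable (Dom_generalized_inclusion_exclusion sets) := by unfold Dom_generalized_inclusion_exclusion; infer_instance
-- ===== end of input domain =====

-- B replaces A's 2^n-subset inclusion-exclusion enumeration by a single linear union pass (measured asymptotically faster).


-- ===== PORT A =====
-- itertools.combinations(L, r), in itertools' order (each inner List Int encodes a Python set of ints)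
def pvCombos : Nat → List (List Int) → List (List (List Int))
  | 0, _ => [[]]
  | _ + 1, [] => []
  | r + 1, x :: xs => ((pvCombos r xs).map (x :: ·)) ++ pvCombos (r + 1) xs

-- len(set.intersection(*subset)): the number of DISTINCT elements of the first set lying in all others
def pvInterLen (c : List (List Int)) : Nat :=
  match c with
  | [] => 0  -- unreachable: A only intersects nonempty subsets (r ≥ 1)
  | h :: t => (((PySem.Set.ofList h).filter (fun x => t.all (fun s => decide (x ∈ s)))).length)

def generalized_inclusion_exclusion (sets : List (List Int)) : Int :=
  let n : Int := sets.length
  (PySem.List.pyRange 1 (n + 1) 1).foldl (fun total r =>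
    (pvCombos r.toNat sets).foldl (fun total c =>
      total + (-1 : Int) ^ (r.toNat + 1) * (pvInterLen c : Int)) total) 0

-- ===== PORT B =====
def generalized_inclusion_exclusion_alt (sets : List (List Int)) : Int :=
  let result := sets.foldl (fun result s => PySem.Set.union result s) PySem.Set.empty
  (result.length : Int)

-- ===== PRECONDITION & SPEC =====
def Spec_generalized_inclusion_exclusion (sets : List (List Int)) (out : Int) : Prop := out = generalized_inclusion_exclusion_alt sets
instance (sets : List (List Int)) (out : Int) : Decidable (Spec_generalized_inclusion_exclusion sets out) := by unfold Spec_generalized_inclusion_exclusion; infer_instance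

-- ===== CLAIM (what is proved, stated in full; the proofs are below) =====
def Claim_equal_generalized_inclusion_exclusion : Prop := ∀ (sets : List (List Int)), Dom_generalized_inclusion_exclusion sets → Spec_generalized_inclusion_exclusion sets (generalized_inclusion_exclusion sets)

-- ===== LEMMAS AND PROOFS =====

-- every member of pvCombos r L has length r
theorem pvCombos_length {r : Nat} {L c : List (List Int)} (h : c ∈ pvCombos r L) : c.length = r := by
  induction L generalizing r c with
  | nil => cases r with
    | zero => simp [pvCombos] at h; simp [h]
    | succ r => simp [pvCombos] at h
  | cons x xs ih => cases r with
    | zero => simp [pvCombos] at h; simp [h]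
    | succ r =>
      simp [pvCombos] at h
      rcases h with ⟨c', hc', rfl⟩ | h
      · simp [ih hc']
      · exact ih h

-- every member of pvCombos r L is a sublist of L
theorem pvCombos_sublist {r : Nat} {L c : List (List Int)} (h : c ∈ pvCombos r L) : c.Sublist L := by
  induction L generalizing r c with
  | nil => cases r with
    | zero => simp [pvCombos] at h; simp [h]
    | succ r => simp [pvCombos] at h
  | cons x xs ih => cases r with
    | zero => simp [pvCombos] at h; simp [h]
    | succ r =>
      simp [pvCombos] at h
      rcases h with ⟨c', hc', rfl⟩ | h
      · exact (ih hc').cons₂ x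
      · exact (ih h).cons x

-- the number of combinations is a binomial coefficient
theorem pvCombos_count (r : Nat) (L : List (List Int)) : (pvCombos r L).length = L.length.choose r := by
  induction L generalizing r with
  | nil => cases r <;> simp [pvCombos]
  | cons x xs ih => cases r with
    | zero => simp [pvCombos]
    | succ r => simp [pvCombos, ih, Nat.choose_succ_succ]

-- filtering combinations by "all members satisfy p" = combinations of the filtered list
theorem pvCombos_filter (p : List Int → Bool) (r : Nat) (L : List (List Int)) :
    (pvCombos r L).filter (fun c => c.all p) = pvCombos r (L.filter p) := by
  induction L generalizing r with
  | nil => cases r <;> simp [pvCombos]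
  | cons x xs ih => cases r with
    | zero => simp [pvCombos]
    | succ r =>
      by_cases hx : p x
      · simp [pvCombos, hx, List.filter_append, List.filter_map, Function.comp_def, ih]
      · simp [pvCombos, hx, List.filter_append, List.filter_map, Function.comp_def, ih]

-- the 0/1 sum over the combinations of rank r counts a binomial coefficient
theorem pvCountCombos (x : Int) (r : Nat) (sets : List (List Int)) :
    ((pvCombos r sets).map (fun c => if c.all (fun s => decide (x ∈ s)) then (1 : Int) else 0)).sum
      = ((sets.filter (fun s => decide (x ∈ s))).length.choose r : Int) := by
  rw [PySem.List.sum_map_ite_one_zero, List.countP_eq_length_filter, pvCombos_filter, pvCombos_count]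

-- the intersection size of a nonempty subset, counted over the deduplicated flattened universe
theorem pvInterLen_eq (sets : List (List Int)) (c : List (List Int)) (hc : c.Sublist sets) (hne : c ≠ []) :
    pvInterLen c = (PySem.Set.ofList sets.flatten).countP (fun x => c.all (fun s => decide (x ∈ s))) := by
  match c, hne with
  | h :: t, _ =>
    have hmem : h ∈ sets := hc.subset (List.mem_cons_self ..)
    rw [List.countP_eq_length_filter]
    apply List.Perm.length_eq
    apply (List.perm_ext_iff_of_nodup ((PySem.Set.nodup_ofList h).filter _)
      ((PySem.Set.nodup_ofList sets.flatten).filter _)).2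
    intro x
    simp only [List.mem_filter, PySem.Set.mem_ofList, List.mem_flatten, List.all_cons,
      Bool.and_eq_true, decide_eq_true_eq]
    constructor
    · rintro ⟨hxh, hall⟩
      exact ⟨⟨h, hmem, hxh⟩, hxh, hall⟩
    · rintro ⟨-, hxh, hall⟩
      exact ⟨hxh, hall⟩

-- alternating binomial sum: for 1 ≤ m ≤ n, Σ_{k<n} (-1)^k C(m,k+1) = 1
theorem pvAltSum (m n : Nat) (h1 : 1 ≤ m) (h2 : m ≤ n) :
    ∑ k ∈ Finset.range n, (-1 : Int) ^ k * (m.choose (k + 1) : Int) = 1 := by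
  have halt := Int.alternating_sum_range_choose (n := m)
  rw [if_neg (by omega)] at halt
  have hz : ∑ i ∈ Finset.range (n + 1), (-1 : Int) ^ i * (m.choose i : Int) = 0 := by
    rw [← halt]
    have hsub : Finset.range (m + 1) ⊆ Finset.range (n + 1) := by
      intro i hi; simp only [Finset.mem_range] at hi ⊢; omega
    apply (Finset.sum_subset hsub _).symm
    intro i hi his
    simp only [Finset.mem_range] at hi his
    simp [Nat.choose_eq_zero_of_lt (by omega : m < i)]
  rw [Finset.sum_range_succ'] at hz
  simp only [pow_succ] at hz
  have hneg : ∑ k ∈ Finset.range n, (-1 : Int) ^ k * (-1) * (m.choose (k + 1) : Int)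
      = -∑ k ∈ Finset.range n, (-1 : Int) ^ k * (m.choose (k + 1) : Int) := by
    rw [← Finset.sum_neg_distrib]; apply Finset.sum_congr rfl; intro k _; ring
  rw [hneg] at hz
  simp at hz
  omega

-- List.range sums as Finset.range sums
theorem pvSumRange (f : Nat → Int) (n : Nat) :
    ((List.range n).map f).sum = ∑ k ∈ Finset.range n, f k := by
  induction n with
  | zero => simp
  | succ n ih => simp [List.range_succ, Finset.sum_range_succ, ih]

-- double list sums commute
theorem pvSumComm {α β : Type} (l1 : List α) (l2 : List β) (f : α → β → Int) :
    (l1.map (fun a => (l2.map (f a)).sum)).sum = (l2.map (fun b => (l1.map (fun a => f a b)).sum)).sum := by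
  induction l1 with
  | nil => simp
  | cons a l1 ih => simp [ih]

-- B computes the size of the deduplicated flattened input
theorem pvAlt_eq (sets : List (List Int)) :
    generalized_inclusion_exclusion_alt sets = ((PySem.Set.ofList sets.flatten).length : Int) := by
  unfold generalized_inclusion_exclusion_alt
  have : sets.foldl (fun result s => PySem.Set.union result s) PySem.Set.empty
      = PySem.Set.ofList sets.flatten := by
    rw [PySem.Set.ofList_eq_foldl, List.foldl_flatten]
    rfl
  rw [this]

-- ===== VERDICT (by name: the statement is the Claim_ definition above) =====
theorem generalized_inclusion_exclusion_spec : Claim_equal_generalized_inclusion_exclusion := by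
  intro sets _
  unfold Spec_generalized_inclusion_exclusion
  rw [pvAlt_eq]
  have hA : generalized_inclusion_exclusion sets
      = (PySem.List.pyRange 1 ((sets.length : Int) + 1) 1).foldl (fun total r =>
          (pvCombos r.toNat sets).foldl (fun total c =>
            total + (-1 : Int) ^ (r.toNat + 1) * (pvInterLen c : Int)) total) 0 := rfl
  rw [hA, PySem.List.pyRange_one]
  have hn : ((sets.length : Int) + 1 - 1).toNat = sets.length := by omega
  rw [hn, List.foldl_map]
  have ht : ∀ k : Nat, ((1 : Int) + (k : Int)).toNat = k + 1 := by intro k; omega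
  simp only [ht, PySem.List.foldl_add, zero_add]
  -- swap the element sum outside each per-rank combination sum
  have hswap1 : ∀ k : Nat, ((pvCombos (k + 1) sets).map (fun c =>
        (-1 : Int) ^ (k + 1 + 1) * (pvInterLen c : Int))).sum
      = ((PySem.Set.ofList sets.flatten).map (fun x => ((pvCombos (k + 1) sets).map (fun c =>
          (-1 : Int) ^ (k + 1 + 1) * (if c.all (fun s => decide (x ∈ s)) then (1 : Int) else 0))).sum)).sum := by
    intro k
    rw [← pvSumComm]
    apply congrArg
    apply List.map_congr_left
    intro c hcm
    have hlen := pvCombos_length hcm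
    have hne : c ≠ [] := by intro hnil; rw [hnil] at hlen; simp at hlen
    rw [pvInterLen_eq sets c (pvCombos_sublist hcm) hne, ← PySem.List.sum_map_ite_one_zero,
      List.sum_map_mul_left]
  simp only [hswap1]
  rw [pvSumComm]
  -- each element of the union contributes exactly 1 to the alternating sum
  have hone : ∀ x ∈ PySem.Set.ofList sets.flatten,
      ((List.range sets.length).map (fun k => ((pvCombos (k + 1) sets).map (fun c =>
        (-1 : Int) ^ (k + 1 + 1) * (if c.all (fun s => decide (x ∈ s)) then (1 : Int) else 0))).sum)).sum = 1 := by
    intro x hx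
    have hx' : x ∈ sets.flatten := by
      have := PySem.Set.mem_ofList (xs := sets.flatten) (y := x)
      tauto
    have hm1 : 1 ≤ (sets.filter (fun s => decide (x ∈ s))).length := by
      rcases List.mem_flatten.1 hx' with ⟨s, hs, hxs⟩
      have hmem : s ∈ sets.filter (fun s => decide (x ∈ s)) := List.mem_filter.2 ⟨hs, by simpa⟩
      exact List.length_pos_of_mem hmem
    have hm2 : (sets.filter (fun s => decide (x ∈ s))).length ≤ sets.length :=
      List.length_filter_le _ _
    simp only [List.sum_map_mul_left, pvCountCombos]
    rw [pvSumRange]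
    have hsgn : ∀ k : Nat, (-1 : Int) ^ (k + 1 + 1) = (-1) ^ k := by
      intro k; rw [pow_succ, pow_succ]; ring
    calc ∑ k ∈ Finset.range sets.length, (-1 : Int) ^ (k + 1 + 1)
          * (((sets.filter (fun s => decide (x ∈ s))).length.choose (k + 1) : Int))
        = ∑ k ∈ Finset.range sets.length, (-1 : Int) ^ k
          * (((sets.filter (fun s => decide (x ∈ s))).length.choose (k + 1) : Int)) := by
          apply Finset.sum_congr rfl; intro k _; rw [hsgn]
      _ = 1 := pvAltSum _ _ hm1 hm2
  rw [List.map_congr_left hone]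
  simp
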